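-- pv_equiv track=rewrite | github.com/20020913/lab2 | lab2.py | Three
-- ===== SOURCE A (Python) =====
-- def  Three(store):
--
--     if_else_num = 0
--     list = []
--     if_elif_num = 0
--
--
--     for word in store:
--         count = 0
--
--         if word == 'if':
--             if_else_num += 1
--
--         if word == 'if' or word == 'elif':
--             list.append(word)
--         elif word == 'else':
--             while True:
--                 temp = list.pop()
--                 if temp == 'elif':
--                     count = 1
--                 elif temp == 'if':
--                     break
--         if count == 1:
--             if_elif_num += 1
--
--
--     for word in list:
--
--     # Consider that there is no else in if else if structure
--
--         if word == 'if':
--             if_else_num -= 1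
--     return if_else_num, if_elif_num
-- ===== SOURCE B (Python) =====
-- def Three(store):
--     # stack of counters: one entry per open 'if', holding the number of
--     # 'elif' tokens seen since that 'if'; no inner pop loop needed.
--     counts = []
--     if_else_num = 0
--     if_elif_num = 0
--     for word in store:
--         if word == 'if':
--             counts.append(0)
--         elif word == 'elif':
--             if counts:
--                 counts[-1] += 1
--         elif word == 'else':
--             c = counts.pop()
--             if_else_num += 1
--             if c:
--                 if_elif_num += 1
--     return if_else_num, if_elif_num
-- ===== Notes on version B (the rewrite author's own statement) =====
-- stated objective: simpler
-- what changed: B replaces A's token stack with a stack of integers (one elif-counter per open 'if'): 'elif' increments the top counter in O(1), so A's inner pop-until-'if' while loop disappears, and each matched if-else is counted directly at its 'else' instead of A's count-every-'if'-then-subtract-leftovers trailing pass.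
import Mathlib
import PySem

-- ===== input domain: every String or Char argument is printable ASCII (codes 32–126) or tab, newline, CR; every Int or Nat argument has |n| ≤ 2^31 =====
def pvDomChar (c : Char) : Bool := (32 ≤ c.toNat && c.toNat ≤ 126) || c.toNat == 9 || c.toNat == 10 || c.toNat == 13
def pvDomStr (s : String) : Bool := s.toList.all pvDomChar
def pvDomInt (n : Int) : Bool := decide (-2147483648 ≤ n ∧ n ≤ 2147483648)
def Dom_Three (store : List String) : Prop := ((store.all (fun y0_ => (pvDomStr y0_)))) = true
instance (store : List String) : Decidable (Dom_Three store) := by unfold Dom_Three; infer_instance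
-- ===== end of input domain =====

-- B replaces A's token stack + inner pop-until-'if' loop with a stack of elif-counters
-- (one int per open 'if') and counts each matched if-else directly at its 'else';
-- objective: simpler. (Both raise IndexError on an 'else' with no open 'if' — excluded by Pre_Three.)

-- ===== PORT A =====
-- A's inner `while True` pop loop; stack head = top (Python list end). Returns none where
-- Python's list.pop() raises IndexError.
def popA : List String → Int → Option (List String × Int)
  | [], _ => none
  | t :: rest, count =>
      if t = "elif" then popA rest 1
      else if t = "if" then some (rest, count)
      else popA rest count

-- A's main loop: state (if_else_num, stack, if_elif_num); none = IndexError occurred.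
def ThreeA : List String → Int → List String → Int → Option (Int × List String × Int)
  | [], ie, stk, iel => some (ie, stk, iel)
  | w :: ws, ie, stk, iel =>
      let count : Int := 0
      let ie := if w = "if" then ie + 1 else ie
      if w = "if" ∨ w = "elif" then
        ThreeA ws ie (w :: stk) (if count = 1 then iel + 1 else iel)
      else if w = "else" then
        match popA stk 0 with
        | none => none
        | some (stk', count') => ThreeA ws ie stk' (if count' = 1 then iel + 1 else iel)
      else
        ThreeA ws ie stk (if count = 1 then iel + 1 else iel)

-- trailing `for word in list: if word == 'if': if_else_num -= 1` (list order = bottom→top)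
def finishA : Option (Int × List String × Int) → Int × Int
  | none => (0, 0)   -- unreachable under Pre_Three (Python raises IndexError there)
  | some (ie, stk, iel) =>
      (stk.reverse.foldl (fun acc w => if w = "if" then acc - 1 else acc) ie, iel)

def Three (store : List String) : Int × Int := finishA (ThreeA store 0 [] 0)

-- ===== PORT B =====
-- B's loop: `counts` head = top (Python list end); none = IndexError at counts.pop().
def ThreeB : List String → List Int → Int → Int → Option (Int × Int)
  | [], _, ie, iel => some (ie, iel)
  | w :: ws, counts, ie, iel =>
      if w = "if" then ThreeB ws ((0 : Int) :: counts) ie iel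
      else if w = "elif" then
        ThreeB ws (match counts with | [] => [] | c :: r => (c + 1) :: r) ie iel
      else if w = "else" then
        match counts with
        | [] => none
        | c :: r => ThreeB ws r (ie + 1) (if c ≠ 0 then iel + 1 else iel)
      else ThreeB ws counts ie iel

def Three_alt (store : List String) : Int × Int :=
  (ThreeB store [] 0 0).getD (0, 0)   -- unreachable default under Pre_Three

-- ===== PRECONDITION & SPEC =====
-- Pre_Three excludes exactly the inputs where Python A raises IndexError: an 'else' token with
-- no matching unconsumed 'if' before it (stack pop from empty).
def Pre_Three (store : List String) : Prop :=
  ∀ i ∈ List.range store.length,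
    store.getD i "" = "else" → (store.take i).count "else" < (store.take i).count "if"
instance (store : List String) : Decidable (Pre_Three store) := by unfold Pre_Three; infer_instance

def pvWitness_Three : List String := ["if", "elif", "else", "if", "print"]

def Spec_Three (store : List String) (out : Int × Int) : Prop := out = Three_alt store
instance (store : List String) (out : Int × Int) : Decidable (Spec_Three store out) := by unfold Spec_Three; infer_instance

-- ===== CLAIM (what is proved, stated in full; the proofs are below) =====
def Claim_equal_Three : Prop := ∀ (store : List String), Dom_Three store → Pre_Three store → Spec_Three store (Three store)

-- ===== LEMMAS AND PROOFS =====

-- abstraction: A's token stack → B's counter stack (top elif-run counts, head = top)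
def toCounts : List String → List Nat
  | [] => []
  | w :: rest =>
      if w = "if" then 0 :: toCounts rest
      else match toCounts rest with
           | [] => []
           | c :: r => (c + 1) :: r

def mapInt (l : List Nat) : List Int := l.map (fun n => (n : Int))

theorem mapInt_cons (c : Nat) (r : List Nat) : mapInt (c :: r) = (c : Int) :: mapInt r := rfl

-- number of "if" tokens in a stack
def cif (l : List String) : Int := ((l.filter (fun w => w = "if")).length : Int)

theorem cif_cons (w : String) (l : List String) :
    cif (w :: l) = if w = "if" then cif l + 1 else cif l := by
  simp [cif, List.filter_cons]; split_ifs with h <;> simp_all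

theorem foldsub_eq (l : List String) (ie : Int) :
    l.foldl (fun acc w => if w = "if" then acc - 1 else acc) ie = ie - cif l := by
  induction l generalizing ie with
  | nil => simp [cif]
  | cons w ws ih => simp only [List.foldl_cons, ih, cif_cons]; split_ifs <;> omega

theorem cif_reverse (l : List String) : cif l.reverse = cif l := by
  simp [cif]

-- one counter per "if" on the stack
theorem toCounts_length (l : List String) : ((toCounts l).length : Int) = cif l := by
  induction l with
  | nil => simp [toCounts, cif]
  | cons w rest ih =>
    rw [cif_cons]
    by_cases h : w = "if"
    · simp [toCounts, h, ← ih]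
    · simp only [toCounts, h, if_false]
      cases hr : toCounts rest <;> simp_all

-- A's pop loop, read through the abstraction
theorem popA_counts (stk : List String) (h : ∀ x ∈ stk, x = "if" ∨ x = "elif") (acc : Int) :
    (toCounts stk = [] → popA stk acc = none) ∧
    (∀ c r, toCounts stk = c :: r →
      ∃ rest, popA stk acc = some (rest, if c = 0 then acc else 1) ∧ toCounts rest = r ∧
        (∀ x ∈ rest, x = "if" ∨ x = "elif")) := by
  induction stk generalizing acc with
  | nil => exact ⟨fun _ => rfl, fun c r hcr => by simp [toCounts] at hcr⟩
  | cons t rest ih =>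
    have hrest : ∀ x ∈ rest, x = "if" ∨ x = "elif" := fun x hx => h x (by simp [hx])
    rcases h t (by simp) with ht | ht
    · -- t = "if"
      constructor
      · intro habs; simp [toCounts, ht] at habs
      · intro c r hcr
        simp only [toCounts, ht, if_pos] at hcr
        injection hcr with hc hr
        refine ⟨rest, ?_, hr ▸ rfl, hrest⟩
        simp [popA, ht, ← hc]
    · -- t = "elif"
      have hA : popA (t :: rest) acc = popA rest 1 := by simp [popA, ht]
      have hT : toCounts (t :: rest)
          = match toCounts rest with | [] => [] | c :: r => (c + 1) :: r := by
        simp [toCounts, ht]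
      constructor
      · intro habs
        rw [hA]
        rw [hT] at habs
        cases hr : toCounts rest with
        | nil => exact (ih hrest 1).1 hr
        | cons c r => simp [hr] at habs
      · intro c r hcr
        rw [hT] at hcr
        cases hr : toCounts rest with
        | nil => simp [hr] at hcr
        | cons c' r' =>
          simp only [hr] at hcr
          injection hcr with hc hrr
          obtain ⟨rest', h1, h2, h3⟩ := (ih hrest 1).2 c' r' hr
          refine ⟨rest', ?_, hrr ▸ h2, h3⟩
          have hcne : ¬ c = 0 := by omega
          rw [hA, h1]
          simp [hcne]

-- main invariant: A with token stack ≡ B with the abstracted counter stack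
theorem main_agree (ws : List String) :
    ∀ (stk : List String) (ie iel : Int), (∀ x ∈ stk, x = "if" ∨ x = "elif") →
    finishA (ThreeA ws ie stk iel)
      = (ThreeB ws (mapInt (toCounts stk))
          (ie - ((toCounts stk).length : Int)) iel).getD (0, 0) := by
  induction ws with
  | nil =>
    intro stk ie iel _
    simp only [ThreeA, ThreeB, Option.getD_some, finishA]
    rw [foldsub_eq, cif_reverse, toCounts_length]
  | cons w rest ih =>
    intro stk ie iel hstk
    simp only [ThreeA, ThreeB]
    have h0 : (if (0 : Int) = 1 then iel + 1 else iel) = iel := by norm_num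
    by_cases hif : w = "if"
    · have hor : w = "if" ∨ w = "elif" := Or.inl hif
      rw [if_pos hor, if_pos hif, if_pos hif, h0]
      have hstk' : ∀ x ∈ (w :: stk), x = "if" ∨ x = "elif" := by
        intro x hx; rcases List.mem_cons.mp hx with rfl | hx
        · exact hor
        · exact hstk x hx
      rw [ih (w :: stk) (ie + 1) iel hstk']
      have hT : toCounts (w :: stk) = 0 :: toCounts stk := by simp [toCounts, hif]
      rw [hT, mapInt_cons]
      have harith : ie + 1 - (((0 :: toCounts stk).length : Nat) : Int)
          = ie - ((toCounts stk).length : Int) := by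
        simp only [List.length_cons]; push_cast; ring
      rw [harith, Nat.cast_zero]
    · by_cases hel : w = "elif"
      · have hor : w = "if" ∨ w = "elif" := Or.inr hel
        rw [if_pos hor, if_neg hif, if_neg hif, if_pos hel, h0]
        have hstk' : ∀ x ∈ (w :: stk), x = "if" ∨ x = "elif" := by
          intro x hx; rcases List.mem_cons.mp hx with rfl | hx
          · exact hor
          · exact hstk x hx
        rw [ih (w :: stk) ie iel hstk']
        cases hr : toCounts stk with
        | nil =>
          have hT : toCounts (w :: stk) = [] := by simp [toCounts, hif, hr]
          rw [hT]
          rfl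
        | cons c r =>
          have hT : toCounts (w :: stk) = (c + 1) :: r := by simp [toCounts, hif, hr]
          rw [hT, mapInt_cons, mapInt_cons]
          have h1 : ((c + 1 : Nat) : Int) = (c : Int) + 1 := by push_cast; ring
          have h2 : ((((c + 1) :: r).length : Nat) : Int) = (((c :: r).length : Nat) : Int) := by
            simp
          rw [h1, h2]
      · have hor : ¬ (w = "if" ∨ w = "elif") := by tauto
        rw [if_neg hor, if_neg hif, if_neg hif, if_neg hel]
        by_cases hels : w = "else"
        · rw [if_pos hels, if_pos hels]
          have hp := popA_counts stk hstk 0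
          cases hr : toCounts stk with
          | nil =>
            rw [hp.1 hr]
            simp [finishA, mapInt]
          | cons c r =>
            obtain ⟨rest', h1, h2, h3⟩ := hp.2 c r hr
            rw [h1, mapInt_cons]
            have hcnt : (if (if c = 0 then (0 : Int) else 1) = 1 then iel + 1 else iel)
                = (if (c : Int) ≠ 0 then iel + 1 else iel) := by
              by_cases hc : c = 0 <;> simp [hc]
            show finishA (ThreeA rest ie rest' _) = _
            rw [hcnt, ih rest' ie _ h3, h2]
            have hlen : ie - ((r.length : Nat) : Int)
                = ie - (((c :: r).length : Nat) : Int) + 1 := by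
              simp only [List.length_cons]; push_cast; ring
            rw [hlen]
        · rw [if_neg hels, if_neg hels, h0]
          exact ih stk ie iel hstk

-- ===== VERDICT (by name: the statement is the Claim_ definition above) =====
theorem Three_spec : Claim_equal_Three := by
  intro store _ _
  unfold Spec_Three Three Three_alt
  have h := main_agree store [] 0 0 (by simp)
  simpa [toCounts, mapInt] using h
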